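-- pv_equiv track=rewrite | github.com/CulinaryFrog/Projects | For Fun/Algorithms/Lamp_points.py | solution
-- ===== SOURCE A (Python) =====
-- def modified_search(arr, x):
--     low = 0
--     high = len(arr) - 1
--     mid = (high + low)//2
--     while low <= high:
--         if arr[mid] <= x:
--             if mid == len(arr)-1:
--                 return mid
--             elif arr[mid+1] <= x:
--                 low = mid + 1
--             else:
--                 return mid
--         else:
--             high = mid - 1
--
--         mid = (high + low)// 2
--     return -1
--
-- def solution(lamps, points):
--     start = []
--     end = []
--     ret = []
--     for i in lamps:
--         start += [i[0]]
--         end += [i[1] +1 ]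
--     start.sort()
--     end.sort()
--     for j in points:
--         ret += [modified_search(start, j) - modified_search(end, j)]
--
--     return ret
-- ===== SOURCE B (Python) =====
-- def solution(lamps, points):
--     # Direct prefix-count formulation: a point p is covered by a lamp (s, e)
--     # with multiplicity (s <= p) - (e < p); no sorting, no binary search.
--     return [sum((s <= p) - (e < p) for s, e in lamps) for p in points]
-- ===== Notes on version B (the rewrite author's own statement) =====
-- stated objective: simpler
-- what changed: Replaced the sort-both-lists-then-binary-search design with a one-line direct count per point: sum of (start <= p) - (end < p) over lamps, which equals the difference of the two last-index binary searches.
import Mathlib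
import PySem

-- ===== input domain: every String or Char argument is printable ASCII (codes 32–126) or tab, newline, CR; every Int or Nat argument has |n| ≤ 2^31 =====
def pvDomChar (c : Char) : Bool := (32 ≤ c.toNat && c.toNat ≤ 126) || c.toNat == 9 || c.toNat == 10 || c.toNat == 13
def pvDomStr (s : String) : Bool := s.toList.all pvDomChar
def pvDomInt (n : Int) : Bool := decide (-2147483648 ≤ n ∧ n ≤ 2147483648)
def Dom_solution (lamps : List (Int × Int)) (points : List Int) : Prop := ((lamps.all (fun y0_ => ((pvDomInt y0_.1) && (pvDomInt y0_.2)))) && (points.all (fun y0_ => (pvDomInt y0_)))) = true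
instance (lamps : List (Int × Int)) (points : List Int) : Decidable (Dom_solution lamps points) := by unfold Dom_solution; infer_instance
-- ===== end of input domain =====

-- B replaces A's sort-then-binary-search design with a one-line direct count per point (simpler; no speed claim).

-- ===== PORT A =====
-- the 'while low <= high' loop of modified_search; 'mid' is recomputed from (low, high)
-- exactly as Python does at each iteration head.  arr[mid] is always in range on every
-- call modified_search makes (0 ≤ low ≤ mid ≤ high ≤ len-1), so pyGetD's default is dead.
def msLoop (arr : List Int) (x low high : Int) : Int :=
  if h : low ≤ high then
    let mid := PySem.Int.floordiv (high + low) 2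
    if PySem.List.pyGetD arr mid 0 ≤ x then
      if mid = (arr.length : Int) - 1 then mid
      else if PySem.List.pyGetD arr (mid + 1) 0 ≤ x then
        msLoop arr x (mid + 1) high
      else mid
    else msLoop arr x low (mid - 1)
  else -1
termination_by (high + 1 - low).toNat
decreasing_by
  · have hb := PySem.Int.floordiv_two_mid_bounds h
    rw [Int.add_comm low high] at hb
    omega
  · have hb := PySem.Int.floordiv_two_mid_bounds h
    rw [Int.add_comm low high] at hb
    omega

def modified_search (arr : List Int) (x : Int) : Int :=
  msLoop arr x 0 ((arr.length : Int) - 1)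

def solution (lamps : List (Int × Int)) (points : List Int) : List Int :=
  let start := lamps.foldl (fun acc i => acc ++ [i.1]) []
  let end_ := lamps.foldl (fun acc i => acc ++ [i.2 + 1]) []
  let start := PySem.List.sorted start (fun x => x) false
  let end_ := PySem.List.sorted end_ (fun x => x) false
  points.foldl (fun ret j => ret ++ [modified_search start j - modified_search end_ j]) []

-- ===== PORT B =====
def solution_alt (lamps : List (Int × Int)) (points : List Int) : List Int :=
  points.map (fun p =>
    lamps.foldl (fun acc se =>
      acc + ((if se.1 ≤ p then (1 : Int) else 0) - (if se.2 < p then (1 : Int) else 0))) 0)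

-- ===== PRECONDITION & SPEC =====
def Spec_solution (lamps : List (Int × Int)) (points : List Int) (out : List Int) : Prop := out = solution_alt lamps points
instance (lamps : List (Int × Int)) (points : List Int) (out : List Int) : Decidable (Spec_solution lamps points out) := by unfold Spec_solution; infer_instance

-- ===== CLAIM (what is proved, stated in full; the proofs are below) =====
def Claim_equal_solution : Prop := ∀ (lamps : List (Int × Int)) (points : List Int), Dom_solution lamps points → Spec_solution lamps points (solution lamps points)

-- ===== LEMMAS AND PROOFS =====

-- In a ≤-sorted list the elements ≤ x form a prefix: arr[i] ≤ x iff i < countP (· ≤ x).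
theorem sorted_count_char (arr : List Int) (x : Int) (hs : arr.Pairwise (· ≤ ·)) :
    ∀ (i : Nat) (h : i < arr.length),
      (arr[i] ≤ x ↔ i < arr.countP (fun a => decide (a ≤ x))) := by
  induction arr with
  | nil => intro i h; simp at h
  | cons a tl ih =>
    have ha : ∀ b ∈ tl, a ≤ b := (List.pairwise_cons.mp hs).1
    have htl : tl.Pairwise (· ≤ ·) := (List.pairwise_cons.mp hs).2
    intro i h
    by_cases hax : a ≤ x
    · have hpa : (if decide (a ≤ x) = true then 1 else 0) = 1 := by simp [hax]
      cases i with
      | zero => simp [hax]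
      | succ k =>
        have hk : k < tl.length := by simpa using h
        rw [List.getElem_cons_succ, List.countP_cons, hpa, ih htl k hk]
        omega
    · have hz : tl.countP (fun a => decide (a ≤ x)) = 0 := by
        rw [List.countP_eq_zero]
        intro b hb
        simp only [decide_eq_true_eq]
        exact fun hbx => hax (le_trans (ha b hb) hbx)
      have hpa : (if decide (a ≤ x) = true then 1 else 0) = 0 := by simp [hax]
      cases i with
      | zero => rw [List.countP_cons, hpa, hz]; simp [hax]
      | succ k =>
        have hk : k < tl.length := by simpa using h
        have hnb : ¬ tl[k] ≤ x := fun hle => hax (le_trans (ha _ (List.getElem_mem hk)) hle)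
        rw [List.getElem_cons_succ, List.countP_cons, hpa, hz]
        simp [hnb]

theorem msLoop_correct (arr : List Int) (x : Int) (hs : arr.Pairwise (· ≤ ·)) :
    ∀ (n : Nat) (low high : Int), (high + 1 - low).toNat ≤ n → 0 ≤ low →
      high ≤ (arr.length : Int) - 1 →
      low ≤ (arr.countP (fun a => decide (a ≤ x)) : Int) →
      (arr.countP (fun a => decide (a ≤ x)) : Int) ≤ high + 1 →
      (0 < low → low < (arr.countP (fun a => decide (a ≤ x)) : Int)) →
      msLoop arr x low high = (arr.countP (fun a => decide (a ≤ x)) : Int) - 1 := by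
  intro n
  induction n with
  | zero =>
    intro low high hn hlo hhi hlc hch hpos
    rw [msLoop, dif_neg (by omega : ¬ low ≤ high)]
    have hC : (arr.countP (fun a => decide (a ≤ x)) : Int) = 0 := by
      by_cases h0 : low = 0
      · omega
      · exact absurd (hpos (by omega)) (by omega)
    omega
  | succ n ih =>
    intro low high hn hlo hhi hlc hch hpos
    by_cases h : low ≤ high
    · rw [msLoop, dif_pos h]
      have hb := PySem.Int.floordiv_two_mid_bounds h
      rw [Int.add_comm low high] at hb
      set mid := PySem.Int.floordiv (high + low) 2 with hmiddef
      have hmlt : mid.toNat < arr.length := by omega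
      have hget : PySem.List.pyGetD arr mid 0 = arr[mid.toNat] :=
        PySem.List.pyGetD_eq_getElem (xs := arr) (i := mid) (d := 0) (by omega) (by omega)
      by_cases h1 : PySem.List.pyGetD arr mid 0 ≤ x
      · rw [if_pos h1]
        have hmidC : mid.toNat < arr.countP (fun a => decide (a ≤ x)) :=
          (sorted_count_char arr x hs mid.toNat hmlt).mp (hget ▸ h1)
        have hCle : arr.countP (fun a => decide (a ≤ x)) ≤ arr.length :=
          List.countP_le_length
        by_cases h2 : mid = (arr.length : Int) - 1
        · rw [if_pos h2]
          omega
        · rw [if_neg h2]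
          have hm1 : mid.toNat + 1 < arr.length := by omega
          have hget1 : PySem.List.pyGetD arr (mid + 1) 0 = arr[mid.toNat + 1] := by
            have h' := PySem.List.pyGetD_eq_getElem (xs := arr) (i := mid + 1) (d := 0)
              (by omega) (by omega)
            rw [h']
            congr 1
            omega
          by_cases h3 : PySem.List.pyGetD arr (mid + 1) 0 ≤ x
          · rw [if_pos h3]
            have hm1C : mid.toNat + 1 < arr.countP (fun a => decide (a ≤ x)) :=
              (sorted_count_char arr x hs (mid.toNat + 1) hm1).mp (hget1 ▸ h3)
            exact ih (mid + 1) high (by omega) (by omega) hhi (by omega) hch (by omega)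
          · rw [if_neg h3]
            have hge : ¬ (mid.toNat + 1 < arr.countP (fun a => decide (a ≤ x))) :=
              fun hc => h3 (hget1 ▸ (sorted_count_char arr x hs (mid.toNat + 1) hm1).mpr hc)
            omega
      · rw [if_neg h1]
        have hge : ¬ (mid.toNat < arr.countP (fun a => decide (a ≤ x))) :=
          fun hc => h1 (hget ▸ (sorted_count_char arr x hs mid.toNat hmlt).mpr hc)
        exact ih low (mid - 1) (by omega) hlo (by omega) hlc (by omega) hpos
    · rw [msLoop, dif_neg h]
      have hC : (arr.countP (fun a => decide (a ≤ x)) : Int) = 0 := by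
        by_cases h0 : low = 0
        · omega
        · exact absurd (hpos (by omega)) (by omega)
      omega

theorem modified_search_eq (arr : List Int) (x : Int) (hs : arr.Pairwise (· ≤ ·)) :
    modified_search arr x = (arr.countP (fun a => decide (a ≤ x)) : Int) - 1 := by
  have hc : arr.countP (fun a => decide (a ≤ x)) ≤ arr.length := List.countP_le_length
  exact msLoop_correct arr x hs arr.length 0 ((arr.length : Int) - 1) (by omega)
    le_rfl le_rfl (Int.natCast_nonneg _) (by omega) (by omega)

-- B's running sum equals the difference of the two counts.
theorem alt_fold_eq (lamps : List (Int × Int)) (p : Int) :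
    ∀ acc : Int,
      lamps.foldl (fun acc se =>
        acc + ((if se.1 ≤ p then (1 : Int) else 0) - (if se.2 < p then (1 : Int) else 0))) acc
      = acc + (lamps.countP (fun se => decide (se.1 ≤ p)) : Int)
            - (lamps.countP (fun se => decide (se.2 < p)) : Int) := by
  induction lamps with
  | nil => intro acc; simp
  | cons l tl ih =>
    intro acc
    simp only [List.foldl_cons, List.countP_cons, ih, decide_eq_true_eq]
    split_ifs <;> push_cast <;> omega

theorem solution_pointwise (lamps : List (Int × Int)) (j : Int) :
    modified_search (PySem.List.sorted (lamps.map Prod.fst) (fun x => x) false) j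
      - modified_search (PySem.List.sorted (lamps.map (fun i => i.2 + 1)) (fun x => x) false) j
    = (lamps.countP (fun se => decide (se.1 ≤ j)) : Int)
      - (lamps.countP (fun se => decide (se.2 < j)) : Int) := by
  have hpair (xs : List Int) :
      (PySem.List.sorted xs (fun x => x) false).Pairwise (· ≤ ·) :=
    PySem.List.sorted_pairwise xs (fun x => x)
  rw [modified_search_eq _ j (hpair _), modified_search_eq _ j (hpair _)]
  rw [(PySem.List.sorted_perm (lamps.map Prod.fst) (fun x => x) false).countP_eq,
      (PySem.List.sorted_perm (lamps.map (fun i => i.2 + 1)) (fun x => x) false).countP_eq]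
  rw [List.countP_map, List.countP_map]
  have h1 : lamps.countP ((fun a => decide (a ≤ j)) ∘ Prod.fst)
      = lamps.countP (fun se => decide (se.1 ≤ j)) := rfl
  have h2 : ((fun a => decide (a ≤ j)) ∘ (fun i : Int × Int => i.2 + 1))
      = (fun se : Int × Int => decide (se.2 < j)) := by
    funext se
    simp only [Function.comp_apply]
    rw [decide_eq_decide]
    omega
  rw [h1, h2]; omega

-- ===== VERDICT (by name: the statement is the Claim_ definition above) =====
theorem solution_spec : Claim_equal_solution := by
  intro lamps points _
  unfold Spec_solution solution solution_alt
  rw [PySem.List.foldl_append_singleton_eq_map, PySem.List.foldl_append_singleton_eq_map,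
      PySem.List.foldl_append_singleton_eq_map]
  apply List.map_congr_left
  intro j _
  rw [List.nil_append, List.nil_append, alt_fold_eq lamps j 0, solution_pointwise lamps j]
  omega
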